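-- pv_equiv track=rewrite | github.com/infinitin/the_poetry_plagiarist | shayar/analyse/detectors/basic_structure.py | count_lines_per_stanza
-- ===== SOURCE A (Python) =====
-- def count_lines_per_stanza(poem):
--     lines_per_stanza = []
--
--     lines = 0
--     for line in poem:
--         if not line.strip():
--             lines_per_stanza.append(lines)
--             lines = 0
--         else:
--             lines += 1
--
--     lines_per_stanza.append(lines)
--
--     return lines_per_stanza
-- ===== SOURCE B (Python) =====
-- def count_lines_per_stanza(poem):
--     lines = list(poem)
--     blanks = [i for i, l in enumerate(lines) if not l.strip()]
--     boundaries = [-1] + blanks + [len(lines)]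
--     return [b - a - 1 for a, b in zip(boundaries, boundaries[1:])]
-- ===== Notes on version B (the rewrite author's own statement) =====
-- stated objective: alternative
-- what changed: Replaces A's running-counter accumulator with blank-line index collection plus boundary gap arithmetic (adjacent differences over [-1]+blanks+[len]).
import Mathlib
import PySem

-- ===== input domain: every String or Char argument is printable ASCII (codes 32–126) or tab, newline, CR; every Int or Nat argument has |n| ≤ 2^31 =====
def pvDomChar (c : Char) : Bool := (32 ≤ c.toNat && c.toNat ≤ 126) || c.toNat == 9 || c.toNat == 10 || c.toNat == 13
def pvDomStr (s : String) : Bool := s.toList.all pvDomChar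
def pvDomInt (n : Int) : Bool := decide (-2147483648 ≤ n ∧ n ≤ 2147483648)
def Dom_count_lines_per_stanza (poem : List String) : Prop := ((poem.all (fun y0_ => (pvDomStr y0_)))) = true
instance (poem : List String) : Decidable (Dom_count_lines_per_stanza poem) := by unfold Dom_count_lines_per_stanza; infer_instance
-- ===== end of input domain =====

-- B replaces A's running counter with blank-index collection and boundary gap arithmetic (alternative decomposition, same cost).

-- ===== PORT A =====
-- A: accumulate a running line count, flushing it on every blank line, then append the final count.
def count_lines_per_stanza (poem : List String) : List Int :=
  let st := poem.foldl
    (fun (s : List Int × Int) line =>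
      if PySem.Str.strip line = "" then (s.1 ++ [s.2], 0) else (s.1, s.2 + 1))
    ([], 0)
  st.1 ++ [st.2]

-- ===== PORT B =====
-- B: indices of blank lines, sentinel boundaries -1 and len, adjacent differences minus one.
def count_lines_per_stanza_alt (poem : List String) : List Int :=
  let lines := poem
  let blanks : List Int :=
    (PySem.List.enumerate lines 0).filterMap
      (fun p => if PySem.Str.strip p.2 = "" then some p.1 else none)
  let boundaries : List Int := -1 :: (blanks ++ [(lines.length : Int)])
  List.zipWith (fun a b => b - a - 1) boundaries boundaries.tail

-- ===== PRECONDITION & SPEC =====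
def Spec_count_lines_per_stanza (poem : List String) (out : List Int) : Prop := out = count_lines_per_stanza_alt poem
instance (poem : List String) (out : List Int) : Decidable (Spec_count_lines_per_stanza poem out) := by unfold Spec_count_lines_per_stanza; infer_instance

-- ===== CLAIM (what is proved, stated in full; the proofs are below) =====
def Claim_equal_count_lines_per_stanza : Prop := ∀ (poem : List String), Dom_count_lines_per_stanza poem → Spec_count_lines_per_stanza poem (count_lines_per_stanza poem)

-- ===== LEMMAS AND PROOFS =====

-- common reference shape: head-increment and the structural recursion both programs compute
def pvIncHead (n : Int) : List Int → List Int
  | x :: xs => (n + x) :: xs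
  | [] => []

def pvStanzas : List String → List Int
  | [] => [0]
  | l :: rest => if PySem.Str.strip l = "" then 0 :: pvStanzas rest else pvIncHead 1 (pvStanzas rest)

lemma pvStanzas_ne_nil (p : List String) : pvStanzas p ≠ [] := by
  induction p with
  | nil => simp [pvStanzas]
  | cons l rest ih =>
    simp only [pvStanzas]
    split
    · simp
    · cases h : pvStanzas rest with
      | nil => exact absurd h ih
      | cons x xs => simp [pvIncHead]

-- A's fold equals the reference recursion
lemma foldA_eq (poem : List String) : ∀ (r : List Int) (n : Int),
    (let st := poem.foldl
      (fun (s : List Int × Int) line =>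
        if PySem.Str.strip line = "" then (s.1 ++ [s.2], 0) else (s.1, s.2 + 1)) (r, n)
     st.1 ++ [st.2]) = r ++ pvIncHead n (pvStanzas poem) := by
  induction poem with
  | nil => intro r n; simp [pvStanzas, pvIncHead]
  | cons l rest ih =>
    intro r n
    simp only [List.foldl_cons, pvStanzas]
    by_cases hb : PySem.Str.strip l = ""
    · simp only [hb, if_true]
      have := ih (r ++ [n]) 0
      simp only [this]
      obtain ⟨x, xs, hx⟩ : ∃ x xs, pvStanzas rest = x :: xs := by
        cases h : pvStanzas rest with
        | nil => exact absurd h (pvStanzas_ne_nil rest)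
        | cons a b => exact ⟨a, b, rfl⟩
      simp [hx, pvIncHead]
    · simp only [hb, if_false]
      have := ih r (n + 1)
      simp only [this]
      cases h : pvStanzas rest with
      | nil => exact absurd h (pvStanzas_ne_nil rest)
      | cons x xs => simp [pvIncHead]; ring_nf

-- gap arithmetic, written as the recursion the proofs use
def pvGaps : List Int → List Int
  | a :: b :: rest => (b - a - 1) :: pvGaps (b :: rest)
  | _ => []

lemma pvGaps_cons (a b : Int) (t : List Int) :
    pvGaps (a :: b :: t) = (b - a - 1) :: pvGaps (b :: t) := rfl

lemma zipWith_tail_eq_gaps : ∀ (bs : List Int),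
    List.zipWith (fun a b => b - a - 1) bs bs.tail = pvGaps bs := by
  intro bs
  induction bs with
  | nil => rfl
  | cons a bs ih =>
    cases bs with
    | nil => rfl
    | cons b rest =>
      simp only [List.tail_cons, List.zipWith_cons_cons, pvGaps]
      simpa using ih

lemma gaps_shift : ∀ (bs : List Int), pvGaps (bs.map (· + 1)) = pvGaps bs := by
  intro bs
  induction bs with
  | nil => rfl
  | cons a bs ih =>
    cases bs with
    | nil => rfl
    | cons b rest =>
      simp only [List.map_cons, pvGaps] at ih ⊢
      rw [ih]
      congr 1
      ring

-- the blank-index collector, abbreviated for the proofs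
def pvBlanks (xs : List String) : List Int :=
  (PySem.List.enumerate xs 0).filterMap
    (fun p => if PySem.Str.strip p.2 = "" then some p.1 else none)

-- shifting the enumeration start shifts every collected blank index
lemma blanks_shift : ∀ (xs : List String) (s : Int),
    (PySem.List.enumerate xs s).filterMap
        (fun p => if PySem.Str.strip p.2 = "" then some p.1 else none)
      = (pvBlanks xs).map (· + s) := by
  intro xs
  induction xs with
  | nil => intro s; simp [pvBlanks, PySem.List.enumerate_nil]
  | cons x xs ih =>
    intro s
    simp only [pvBlanks, PySem.List.enumerate_cons, List.filterMap_cons, zero_add]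
    rw [ih (s + 1), ih 1]
    by_cases hb : PySem.Str.strip x = ""
    · simp only [hb, if_true, List.map_cons, List.map_map, pvBlanks]
      congr 1
      · ring
      · apply List.map_congr_left; intro a _; simp; ring
    · simp only [hb, if_false, List.map_map, pvBlanks]
      apply List.map_congr_left; intro a _; simp; ring

lemma blanks_cons (l : String) (rest : List String) :
    pvBlanks (l :: rest)
      = (if PySem.Str.strip l = "" then (0 : Int) :: (pvBlanks rest).map (· + 1)
         else (pvBlanks rest).map (· + 1)) := by
  by_cases hb : PySem.Str.strip l = "" <;>
    simp [pvBlanks, PySem.List.enumerate_cons, blanks_shift rest 1, hb]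

lemma key_gaps (poem : List String) :
    pvGaps (-1 :: (pvBlanks poem ++ [(poem.length : Int)])) = pvStanzas poem := by
  induction poem with
  | nil => decide
  | cons l rest ih =>
    rw [blanks_cons]
    have hcast : (((l :: rest).length : Nat) : Int) = (rest.length : Int) + 1 := by
      simp
    obtain ⟨u, t, ht⟩ : ∃ u t, pvBlanks rest ++ [((rest.length : Int))] = u :: t := by
      cases h : pvBlanks rest with
      | nil => exact ⟨_, _, rfl⟩
      | cons a b => exact ⟨_, _, rfl⟩
    have htail : (pvBlanks rest).map (· + 1) ++ [((rest.length : Int) + 1)]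
        = (u :: t).map (· + 1) := by rw [← ht]; simp
    by_cases hb : PySem.Str.strip l = ""
    · simp only [hb, if_true, pvStanzas, hcast]
      have hlist : (-1 : Int) :: (((0 : Int) :: (pvBlanks rest).map (· + 1)) ++ [((rest.length : Int) + 1)])
          = -1 :: 0 :: ((u + 1) :: t.map (· + 1)) := by
        simp only [List.cons_append, htail]; simp
      rw [hlist, pvGaps_cons]
      have h2 : (0 : Int) :: (u + 1) :: t.map (· + 1) = ((-1 : Int) :: u :: t).map (· + 1) := by
        simp
      rw [h2, gaps_shift, ← ht, ih]
      norm_num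
    · simp only [hb, if_false, pvStanzas, hcast]
      have hlist : (-1 : Int) :: ((pvBlanks rest).map (· + 1) ++ [((rest.length : Int) + 1)])
          = -1 :: (u + 1) :: t.map (· + 1) := by
        simp only [htail]; simp
      rw [hlist, pvGaps_cons]
      have h2 : ((u : Int) + 1) :: t.map (· + 1) = ((u :: t).map (· + 1)) := by simp
      rw [h2, gaps_shift]
      rw [← ih, ht, pvGaps_cons]
      simp only [pvIncHead, List.cons.injEq]
      exact ⟨by ring, trivial⟩

lemma altB_eq (poem : List String) :
    count_lines_per_stanza_alt poem = pvStanzas poem := by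
  unfold count_lines_per_stanza_alt
  rw [zipWith_tail_eq_gaps]
  exact key_gaps poem

-- ===== VERDICT (by name: the statement is the Claim_ definition above) =====
theorem count_lines_per_stanza_spec : Claim_equal_count_lines_per_stanza := by
  intro poem _
  show count_lines_per_stanza poem = count_lines_per_stanza_alt poem
  rw [altB_eq]
  unfold count_lines_per_stanza
  have := foldA_eq poem [] 0
  simp only [this, List.nil_append]
  obtain ⟨x, xs, hx⟩ : ∃ x xs, pvStanzas poem = x :: xs := by
    cases h : pvStanzas poem with
    | nil => exact absurd h (pvStanzas_ne_nil poem)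
    | cons a b => exact ⟨a, b, rfl⟩
  simp [hx, pvIncHead]
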